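-- pv_equiv track=rewrite | github.com/ivgnk/Pyton-Codewars-Leetcode | Leetcode/0624_medi_Maximum Distance in Arrays.py | maxDistance4
-- ===== SOURCE A (Python) =====
-- def maxDistance4(arrays):
--     """
--     :type arrays: List[List[int]]
--     :rtype: int
--     """
--     mi = [s[0] for s in arrays]
--     ma = [s[-1] for s in arrays]
--     if ma == mi: return abs(max(ma) - min(mi))
--
--     ll=len(arrays); rll=range(ll)
--     mi=list({(mi[i],i) for i in rll})
--     ma=list({(ma[i],i) for i in rll})
--
--     dist=-1
--     for a in ma:
--         for i in mi:
--             if a[1] != i[1]: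
--                 z=abs(a[0]-i[0])
--                 if z>dist: dist=z
--     return dist
-- ===== SOURCE B (Python) =====
-- def maxDistance4(arrays):
--     """
--     :type arrays: List[List[int]]
--     :rtype: int
--     """
--     dist = -1
--     started = False
--     for a in arrays:
--         lo, hi = a[0], a[-1]
--         if not started:
--             minF = maxF = lo
--             minL = maxL = hi
--             started = True
--         else:
--             dist = max(dist, hi - minF, maxF - hi, maxL - lo, lo - minL)
--             if lo < minF: minF = lo
--             if lo > maxF: maxF = lo
--             if hi < minL: minL = hi
--             if hi > maxL: maxL = hi
--     return dist
-- ===== Notes on version B (the rewrite author's own statement) =====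
-- stated objective: faster
-- what changed: Replaced A's quadratic all-pairs scan over the (value,index) sets of firsts and lasts by a single pass that keeps the running min/max of the firsts and lasts seen so far and updates the answer with four candidate differences per array.
-- intended difference: On a single-array input whose array has equal first and last element A returns 0 (an accident of its equal-lists shortcut, inconsistent with the -1 it returns for every other single-array input), while B uniformly returns the no-pair sentinel -1; with only one array there is no pair of different arrays, so the uniform sentinel is the intended value. — e.g. on maxDistance4([[5]]): A returns 0, B returns -1
import Mathlib
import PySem

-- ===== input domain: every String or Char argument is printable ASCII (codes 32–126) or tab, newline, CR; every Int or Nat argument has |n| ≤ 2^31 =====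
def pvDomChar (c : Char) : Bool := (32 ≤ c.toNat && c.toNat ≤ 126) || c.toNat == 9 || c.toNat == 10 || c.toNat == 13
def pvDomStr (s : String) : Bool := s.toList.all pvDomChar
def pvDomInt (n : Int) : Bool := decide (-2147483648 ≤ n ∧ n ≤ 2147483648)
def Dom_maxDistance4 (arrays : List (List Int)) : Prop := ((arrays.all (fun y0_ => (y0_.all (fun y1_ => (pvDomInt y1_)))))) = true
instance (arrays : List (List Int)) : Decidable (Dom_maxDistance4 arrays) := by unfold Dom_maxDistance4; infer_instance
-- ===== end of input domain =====

-- B replaces A's quadratic all-pairs scan by a single pass keeping running min/max of firsts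
-- and lasts, updating the answer with four candidate differences per array.

-- ===== PORT A =====
def maxDistance4 (arrays : List (List Int)) : Int :=
  let mi := arrays.map (fun s => PySem.List.pyGetD s 0 0)
  let ma := arrays.map (fun s => PySem.List.pyGetD s (-1) 0)
  if ma = mi then
    |(PySem.List.max? ma (fun x => x)).getD 0 - (PySem.List.min? mi (fun x => x)).getD 0|
  else
    let ll : Int := PySem.List.len arrays
    let rll := PySem.List.pyRange 0 ll 1
    let mi2 : PySem.Set (Int × Int) := PySem.Set.ofList (rll.map (fun i => (PySem.List.pyGetD mi i 0, i)))
    let ma2 : PySem.Set (Int × Int) := PySem.Set.ofList (rll.map (fun i => (PySem.List.pyGetD ma i 0, i)))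
    ma2.foldl (fun dist a =>
      mi2.foldl (fun dist i =>
        if a.2 ≠ i.2 then
          let z := |a.1 - i.1|
          if z > dist then z else dist
        else dist) dist) (-1)

-- ===== PORT B =====
def maxDistance4_alt (arrays : List (List Int)) : Int :=
  (arrays.foldl (fun st a =>
      let lo := PySem.List.pyGetD a 0 0
      let hi := PySem.List.pyGetD a (-1) 0
      match st with
      | (dist, none) => (dist, some (lo, lo, hi, hi))
      | (dist, some (minF, maxF, minL, maxL)) =>
        (max (max (max (max dist (hi - minF)) (maxF - hi)) (maxL - lo)) (lo - minL),
         some (if lo < minF then lo else minF, if lo > maxF then lo else maxF,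
               if hi < minL then hi else minL, if hi > maxL then hi else maxL))
    ) ((-1 : Int), (none : Option (Int × Int × Int × Int)))).1

-- ===== PRECONDITION & SPEC =====
-- Pre_ excludes exactly the inputs where A raises: the empty outer list (ValueError from max())
-- and any empty inner list (IndexError from s[0]).
def Pre_maxDistance4 (arrays : List (List Int)) : Prop :=
  arrays ≠ [] ∧ ∀ a ∈ arrays, a ≠ []
instance (arrays : List (List Int)) : Decidable (Pre_maxDistance4 arrays) := by
  unfold Pre_maxDistance4; infer_instance
def pvWitness_maxDistance4 : List (List Int) := [[1, 2], [3, 4]]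

-- On a single-array input whose array has equal first and last element A returns 0 (an accident of
-- its equal-lists shortcut, inconsistent with the -1 it returns for every other single-array input),
-- while B uniformly returns the no-pair sentinel -1, the intended value since no pair of different
-- arrays exists.
def D_maxDistance4 (arrays : List (List Int)) : Prop :=
  arrays.length = 1 ∧ (arrays.headD []).head? = (arrays.headD []).getLast?
instance (arrays : List (List Int)) : Decidable (D_maxDistance4 arrays) := by
  unfold D_maxDistance4; infer_instance

def Spec_maxDistance4 (arrays : List (List Int)) (out : Int) : Prop :=
  ¬ D_maxDistance4 arrays → out = maxDistance4_alt arrays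
instance (arrays : List (List Int)) (out : Int) : Decidable (Spec_maxDistance4 arrays out) := by
  unfold Spec_maxDistance4; infer_instance

def pvDiffWitness_maxDistance4 : List (List Int) := [[5]]
def pvDiffWitnessOut_maxDistance4 : Int × Int := (0, -1)

-- ===== CLAIM =====
def Claim_unchanged_maxDistance4 : Prop := ∀ (arrays : List (List Int)),
  Dom_maxDistance4 arrays → Pre_maxDistance4 arrays →
  Spec_maxDistance4 arrays (maxDistance4 arrays)
def Claim_changed_maxDistance4 : Prop :=
  Dom_maxDistance4 (pvDiffWitness_maxDistance4) ∧ Pre_maxDistance4 (pvDiffWitness_maxDistance4) ∧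
  D_maxDistance4 (pvDiffWitness_maxDistance4) ∧
  maxDistance4 (pvDiffWitness_maxDistance4) = pvDiffWitnessOut_maxDistance4.1 ∧
  maxDistance4_alt (pvDiffWitness_maxDistance4) = pvDiffWitnessOut_maxDistance4.2 ∧
  pvDiffWitnessOut_maxDistance4.1 ≠ pvDiffWitnessOut_maxDistance4.2
def Claim_exact_maxDistance4 : Prop := ∀ (arrays : List (List Int)),
  Dom_maxDistance4 arrays → Pre_maxDistance4 arrays → D_maxDistance4 arrays →
  maxDistance4 arrays ≠ maxDistance4_alt arrays

-- ===== LEMMAS AND PROOFS =====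

def pvFirsts (arrays : List (List Int)) : List Int := arrays.map (fun s => PySem.List.pyGetD s 0 0)

def pvLasts (arrays : List (List Int)) : List Int := arrays.map (fun s => PySem.List.pyGetD s (-1) 0)

def pvGood (fs ls : List Int) (v : Int) : Prop :=
  (v = -1 ∨ ∃ i j : Nat, i < ls.length ∧ j < fs.length ∧ i ≠ j ∧ v = |ls.getD i 0 - fs.getD j 0|) ∧
  (-1 ≤ v) ∧
  (∀ i j : Nat, i < ls.length → j < fs.length → i ≠ j → |ls.getD i 0 - fs.getD j 0| ≤ v)

theorem pvGood_unique {fs ls : List Int} {v w : Int}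
    (hv : pvGood fs ls v) (hw : pvGood fs ls w) : v = w := by
  obtain ⟨ha, hge, hub⟩ := hv
  obtain ⟨ha', hge', hub'⟩ := hw
  have h1 : v ≤ w := by
    rcases ha with h | ⟨i, j, hi, hj, hij, rfl⟩
    · omega
    · exact hub' i j hi hj hij
  have h2 : w ≤ v := by
    rcases ha' with h | ⟨i, j, hi, hj, hij, rfl⟩
    · omega
    · exact hub i j hi hj hij
  omega

theorem pv_foldl_infl {β : Type} (step : Int → β → Int) (h : ∀ d x, d ≤ step d x) :
    ∀ (l : List β) (d : Int), d ≤ l.foldl step d := by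
  intro l
  induction l with
  | nil => intro d; simp
  | cons x t ih => intro d; exact le_trans (h d x) (ih (step d x))

theorem pv_foldl_attain {β : Type} (step : Int → β → Int) (P : β → Int → Prop)
    (h : ∀ d x, step d x = d ∨ P x (step d x)) :
    ∀ (l : List β) (d : Int), l.foldl step d = d ∨ ∃ x ∈ l, P x (l.foldl step d) := by
  intro l
  induction l with
  | nil => intro d; simp
  | cons x t ih =>
    intro d
    simp only [List.foldl_cons]
    rcases ih (step d x) with heq | ⟨x', hx', hP⟩
    · rw [heq]
      rcases h d x with h1 | h1
      · exact Or.inl h1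
      · exact Or.inr ⟨x, List.mem_cons_self .., h1⟩
    · exact Or.inr ⟨x', List.mem_cons_of_mem _ hx', hP⟩

theorem pv_le_foldl_of_mem {β : Type} (step : Int → β → Int) (h : ∀ d x, d ≤ step d x)
    {x : β} {v : Int} (hx : ∀ e, v ≤ step e x) :
    ∀ (l : List β) (d : Int), x ∈ l → v ≤ l.foldl step d := by
  intro l
  induction l with
  | nil => intro d hm; simp at hm
  | cons y t ih =>
    intro d hm
    simp only [List.foldl_cons]
    rcases List.mem_cons.mp hm with rfl | hm'
    · exact le_trans (hx d) (pv_foldl_infl step h t _)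
    · exact ih _ hm'

theorem pv_getD_mem (l : List Int) (j : Nat) (h : j < l.length) : l.getD j 0 ∈ l := by
  rw [List.getD_eq_getElem l 0 h]; exact List.getElem_mem h

theorem pv_getD_append_lt (u v : List Int) (i : Nat) (h : i < u.length) :
    (u ++ v).getD i 0 = u.getD i 0 := by
  rw [List.getD_eq_getElem _ 0 (by simp; omega), List.getD_eq_getElem u 0 h]
  exact List.getElem_append_left h

theorem pv_getD_append_len (u : List Int) (x : Int) : (u ++ [x]).getD u.length 0 = x := by
  rw [List.getD_eq_getElem _ 0 (by simp)]
  simp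

def pvBstep (st : Int × Option (Int × Int × Int × Int)) (a : List Int) :
    Int × Option (Int × Int × Int × Int) :=
  let lo := PySem.List.pyGetD a 0 0
  let hi := PySem.List.pyGetD a (-1) 0
  match st with
  | (dist, none) => (dist, some (lo, lo, hi, hi))
  | (dist, some (minF, maxF, minL, maxL)) =>
    (max (max (max (max dist (hi - minF)) (maxF - hi)) (maxL - lo)) (lo - minL),
     some (if lo < minF then lo else minF, if lo > maxF then lo else maxF,
           if hi < minL then hi else minL, if hi > maxL then hi else maxL))

theorem pv_alt_eq (arrays : List (List Int)) :
    maxDistance4_alt arrays = (arrays.foldl pvBstep ((-1 : Int), none)).1 := rfl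

theorem pvBmain : ∀ (rest c : List (List Int)) (d mf xf ml xl : Int),
    mf ∈ pvFirsts c → (∀ v ∈ pvFirsts c, mf ≤ v) →
    xf ∈ pvFirsts c → (∀ v ∈ pvFirsts c, v ≤ xf) →
    ml ∈ pvLasts c → (∀ v ∈ pvLasts c, ml ≤ v) →
    xl ∈ pvLasts c → (∀ v ∈ pvLasts c, v ≤ xl) →
    pvGood (pvFirsts c) (pvLasts c) d →
    pvGood (pvFirsts (c ++ rest)) (pvLasts (c ++ rest))
      ((rest.foldl pvBstep (d, some (mf, xf, ml, xl))).1) := by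
  intro rest
  induction rest with
  | nil => intro c d mf xf ml xl _ _ _ _ _ _ _ _ hG; simpa using hG
  | cons a r ih =>
    intro c d mf xf ml xl hmf hmfle hxf hxfge hml hmlle hxl hxlge hG
    simp only [List.foldl_cons]
    have hstep : pvBstep (d, some (mf, xf, ml, xl)) a =
        (max (max (max (max d (PySem.List.pyGetD a (-1) 0 - mf)) (xf - PySem.List.pyGetD a (-1) 0))
             (xl - PySem.List.pyGetD a 0 0)) (PySem.List.pyGetD a 0 0 - ml),
         some (if PySem.List.pyGetD a 0 0 < mf then PySem.List.pyGetD a 0 0 else mf,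
               if PySem.List.pyGetD a 0 0 > xf then PySem.List.pyGetD a 0 0 else xf,
               if PySem.List.pyGetD a (-1) 0 < ml then PySem.List.pyGetD a (-1) 0 else ml,
               if PySem.List.pyGetD a (-1) 0 > xl then PySem.List.pyGetD a (-1) 0 else xl)) := rfl
    rw [hstep]
    set lo := PySem.List.pyGetD a 0 0 with hlo
    set hi := PySem.List.pyGetD a (-1) 0 with hhi
    set F := pvFirsts c with hF
    set L := pvLasts c with hL
    have hFa : pvFirsts (c ++ [a]) = F ++ [lo] := by simp [pvFirsts, hF, ← hlo]
    have hLa : pvLasts (c ++ [a]) = L ++ [hi] := by simp [pvLasts, hL, ← hhi]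
    have hFL : F.length = L.length := by simp [hF, hL, pvFirsts, pvLasts]
    have hmfxf : mf ≤ xf := hxfge mf hmf
    have hmlxl : ml ≤ xl := hxlge ml hml
    obtain ⟨hatt, hge, hub⟩ := hG
    set d' := max (max (max (max d (hi - mf)) (xf - hi)) (xl - lo)) (lo - ml) with hd'
    have hdd' : d ≤ d' := by omega
    have hGa : pvGood (pvFirsts (c ++ [a])) (pvLasts (c ++ [a])) d' := by
      rw [hFa, hLa]
      refine ⟨?_, by omega, ?_⟩
      · -- attainment
        have hchoice : d' = d ∨ d' = hi - mf ∨ d' = xf - hi ∨ d' = xl - lo ∨ d' = lo - ml := by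
          omega
        rcases hchoice with h | h | h | h | h
        · rcases hatt with h0 | ⟨i, j, hi', hj', hij, hv⟩
          · exact Or.inl (by omega)
          · refine Or.inr ⟨i, j, by simp; omega, by simp; omega, hij, ?_⟩
            rw [pv_getD_append_lt _ _ _ hi', pv_getD_append_lt _ _ _ hj', h, hv]
        · obtain ⟨j, hj, hjv⟩ := List.getElem_of_mem hmf
          refine Or.inr ⟨L.length, j, by simp, by simp; omega, by omega, ?_⟩
          rw [pv_getD_append_len, pv_getD_append_lt _ _ _ (by omega),
              List.getD_eq_getElem F 0 hj, hjv, abs_eq_max_neg]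
          omega
        · obtain ⟨j, hj, hjv⟩ := List.getElem_of_mem hxf
          refine Or.inr ⟨L.length, j, by simp, by simp; omega, by omega, ?_⟩
          rw [pv_getD_append_len, pv_getD_append_lt _ _ _ (by omega),
              List.getD_eq_getElem F 0 hj, hjv, abs_eq_max_neg]
          omega
        · obtain ⟨i, hi', hiv⟩ := List.getElem_of_mem hxl
          refine Or.inr ⟨i, F.length, by simp; omega, by simp, by omega, ?_⟩
          rw [pv_getD_append_lt _ _ _ hi', pv_getD_append_len,
              List.getD_eq_getElem L 0 hi', hiv, abs_eq_max_neg]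
          omega
        · obtain ⟨i, hi', hiv⟩ := List.getElem_of_mem hml
          refine Or.inr ⟨i, F.length, by simp; omega, by simp, by omega, ?_⟩
          rw [pv_getD_append_lt _ _ _ hi', pv_getD_append_len,
              List.getD_eq_getElem L 0 hi', hiv, abs_eq_max_neg]
          omega
      · -- upper bounds
        intro i j hi' hj' hij
        simp only [List.length_append, List.length_singleton] at hi' hj'
        rcases Nat.lt_or_ge i L.length with hiL | hiL
        · rcases Nat.lt_or_ge j F.length with hjF | hjF
          · rw [pv_getD_append_lt _ _ _ hiL, pv_getD_append_lt _ _ _ hjF]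
            exact le_trans (hub i j hiL hjF hij) hdd'
          · have hj0 : j = F.length := by omega
            subst hj0
            rw [pv_getD_append_lt _ _ _ hiL, pv_getD_append_len]
            have h1 : L.getD i 0 ≤ xl := hxlge _ (pv_getD_mem L i hiL)
            have h2 : ml ≤ L.getD i 0 := hmlle _ (pv_getD_mem L i hiL)
            rw [abs_eq_max_neg]; omega
        · have hi0 : i = L.length := by omega
          subst hi0
          rcases Nat.lt_or_ge j F.length with hjF | hjF
          · rw [pv_getD_append_len, pv_getD_append_lt _ _ _ hjF]
            have h1 : F.getD j 0 ≤ xf := hxfge _ (pv_getD_mem F j hjF)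
            have h2 : mf ≤ F.getD j 0 := hmfle _ (pv_getD_mem F j hjF)
            rw [abs_eq_max_neg]; omega
          · omega
    have hrw : c ++ a :: r = (c ++ [a]) ++ r := by simp
    rw [hrw]
    apply ih (c ++ [a]) d' _ _ _ _
    · rw [hFa]; by_cases h : lo < mf <;> simp [h, hmf]
    · rw [hFa]; intro v hv; rcases List.mem_append.mp hv with h | h
      · have := hmfle v h; by_cases h2 : lo < mf <;> simp [h2] <;> omega
      · simp at h; subst h; by_cases h2 : lo < mf <;> simp [h2] <;> omega
    · rw [hFa]; by_cases h : lo > xf <;> simp [h, hxf]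
    · rw [hFa]; intro v hv; rcases List.mem_append.mp hv with h | h
      · have := hxfge v h; by_cases h2 : lo > xf <;> simp [h2] <;> omega
      · simp at h; subst h; by_cases h2 : lo > xf <;> simp [h2] <;> omega
    · rw [hLa]; by_cases h : hi < ml <;> simp [h, hml]
    · rw [hLa]; intro v hv; rcases List.mem_append.mp hv with h | h
      · have := hmlle v h; by_cases h2 : hi < ml <;> simp [h2] <;> omega
      · simp at h; subst h; by_cases h2 : hi < ml <;> simp [h2] <;> omega
    · rw [hLa]; by_cases h : hi > xl <;> simp [h, hxl]
    · rw [hLa]; intro v hv; rcases List.mem_append.mp hv with h | h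
      · have := hxlge v h; by_cases h2 : hi > xl <;> simp [h2] <;> omega
      · simp at h; subst h; by_cases h2 : hi > xl <;> simp [h2] <;> omega
    · exact hGa

theorem pvGoodB (arrays : List (List Int)) (hPre : Pre_maxDistance4 arrays) :
    pvGood (pvFirsts arrays) (pvLasts arrays) (maxDistance4_alt arrays) := by
  obtain ⟨hne, _⟩ := hPre
  match arrays with
  | [] => exact absurd rfl hne
  | a :: rest =>
    rw [pv_alt_eq]
    simp only [List.foldl_cons]
    have h0 : pvBstep ((-1 : Int), none) a =
        ((-1 : Int), some (PySem.List.pyGetD a 0 0, PySem.List.pyGetD a 0 0,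
          PySem.List.pyGetD a (-1) 0, PySem.List.pyGetD a (-1) 0)) := rfl
    rw [h0]
    have := pvBmain rest [a] (-1) (PySem.List.pyGetD a 0 0) (PySem.List.pyGetD a 0 0)
      (PySem.List.pyGetD a (-1) 0) (PySem.List.pyGetD a (-1) 0)
      (by simp [pvFirsts]) (by simp [pvFirsts]) (by simp [pvFirsts]) (by simp [pvFirsts])
      (by simp [pvLasts]) (by simp [pvLasts]) (by simp [pvLasts]) (by simp [pvLasts])
      ⟨Or.inl rfl, by omega, by intro i j hi hj hij; simp [pvLasts] at hi; simp [pvFirsts] at hj; omega⟩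
    simpa using this

def pvIstep (a : Int × Int) (dist : Int) (i : Int × Int) : Int :=
  if a.2 ≠ i.2 then
    let z := |a.1 - i.1|
    if z > dist then z else dist
  else dist

def pvOstep (l1 : List (Int × Int)) (dist : Int) (a : Int × Int) : Int :=
  l1.foldl (pvIstep a) dist

theorem pv_nodup_pairs (l : List Int) (b : Int) :
    ((PySem.List.pyRange 0 b 1).map (fun i => (PySem.List.pyGetD l i 0, i))).Nodup := by
  apply List.Nodup.map
  · intro x y h
    simpa using congrArg Prod.snd h
  · exact PySem.List.nodup_pyRange_one 0 _

theorem pv_head?_eq (a : List Int) (h : a ≠ []) : a.head? = some (PySem.List.pyGetD a 0 0) := by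
  cases a with
  | nil => exact absurd rfl h
  | cons x t => simp [PySem.List.pyGetD_zero]

theorem pv_getLast?_eq (a : List Int) (h : a ≠ []) :
    a.getLast? = some (PySem.List.pyGetD a (-1) 0) := by
  rw [PySem.List.pyGetD_neg_one a 0 h]
  exact List.getLast?_eq_some_getLast h

theorem pvA_eq_of_eq (arrays : List (List Int))
    (h : pvLasts arrays = pvFirsts arrays) :
    maxDistance4 arrays =
      |(PySem.List.max? (pvLasts arrays) (fun x => x)).getD 0 -
        (PySem.List.min? (pvFirsts arrays) (fun x => x)).getD 0| := by
  simp only [maxDistance4, pvLasts, pvFirsts] at *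
  rw [if_pos h]

theorem pvA_eq_of_ne (arrays : List (List Int))
    (h : ¬ pvLasts arrays = pvFirsts arrays) :
    maxDistance4 arrays =
      ((List.range arrays.length).map (fun k => (((pvLasts arrays).getD k 0 : Int), (k : Int)))).foldl
        (pvOstep ((List.range arrays.length).map
          (fun k => (((pvFirsts arrays).getD k 0 : Int), (k : Int))))) (-1) := by
  have hlen : PySem.List.len arrays = ((arrays.length : Nat) : Int) := by simp
  have hml : (pvLasts arrays).length = arrays.length := by simp [pvLasts]
  have hfl : (pvFirsts arrays).length = arrays.length := by simp [pvFirsts]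
  have hrw : ∀ l : List Int, l.length = arrays.length →
      (PySem.List.pyRange 0 (PySem.List.len arrays) 1).map (fun i => (PySem.List.pyGetD l i 0, i)) =
      (List.range arrays.length).map (fun k => ((l.getD k 0 : Int), (k : Int))) := by
    intro l hl
    rw [hlen, PySem.List.pyRange_zero_natCast, List.map_map]
    apply List.map_congr_left
    intro k hk
    simp [PySem.List.pyGetD_natCast]
  simp only [maxDistance4, pvLasts, pvFirsts] at *
  rw [if_neg h]
  -- replace the two Set.ofList by the plain lists using nodup
  rw [PySem.Set.ofList_eq_self_of_nodup _ (pv_nodup_pairs (arrays.map (fun s => PySem.List.pyGetD s 0 0)) _),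
      PySem.Set.ofList_eq_self_of_nodup _ (pv_nodup_pairs (arrays.map (fun s => PySem.List.pyGetD s (-1) 0)) _),
      hrw _ hfl, hrw _ hml]
  rfl

theorem pvGoodA1 (arrays : List (List Int)) (hPre : Pre_maxDistance4 arrays)
    (hD : ¬ D_maxDistance4 arrays) (heq : pvLasts arrays = pvFirsts arrays) :
    pvGood (pvFirsts arrays) (pvLasts arrays)
      |(PySem.List.max? (pvLasts arrays) (fun x => x)).getD 0 -
        (PySem.List.min? (pvFirsts arrays) (fun x => x)).getD 0| := by
  obtain ⟨hne, hinner⟩ := hPre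
  set F := pvFirsts arrays with hF
  set L := pvLasts arrays with hL
  have hFlen : F.length = arrays.length := by simp [hF, pvFirsts]
  have hLlen : L.length = arrays.length := by simp [hL, pvLasts]
  have hLne : L ≠ [] := by
    intro h0; apply hne; rw [← List.length_eq_zero_iff, ← hLlen, h0]; rfl
  have hFne : F ≠ [] := heq ▸ hLne
  have hn2 : 2 ≤ arrays.length := by
    by_contra hlt
    have h1 : arrays.length = 1 := by
      have : arrays.length ≠ 0 := by simpa [List.length_eq_zero_iff] using hne
      omega
    apply hD
    obtain ⟨a, rfl⟩ := List.length_eq_one_iff.mp h1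
    have ha : a ≠ [] := hinner a (List.mem_singleton.mpr rfl)
    refine ⟨rfl, ?_⟩
    have hv : PySem.List.pyGetD a (-1) 0 = PySem.List.pyGetD a 0 0 := by
      have := heq
      simp [hL, hF, pvLasts, pvFirsts] at this
      exact this
    simp only [List.headD_cons]
    rw [pv_head?_eq a ha, pv_getLast?_eq a ha, hv]
  cases hM : PySem.List.max? L (fun x => x) with
  | none => exact absurd ((PySem.List.max?_eq_none_iff L _).mp hM) hLne
  | some M =>
  cases hm : PySem.List.min? F (fun x => x) with
  | none => exact absurd ((PySem.List.min?_eq_none_iff F _).mp hm) hFne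
  | some m =>
  simp only [Option.getD_some]
  have hMmem : M ∈ L := PySem.List.max?_mem hM
  have hMmax : ∀ y ∈ L, y ≤ M := PySem.List.max?_isMax hM
  have hmmem : m ∈ F := PySem.List.min?_mem hm
  have hmmin : ∀ y ∈ F, m ≤ y := PySem.List.min?_isMin hm
  have hMmaxF : ∀ y ∈ F, y ≤ M := by rw [← heq]; exact hMmax
  have hMmemF : M ∈ F := by rw [← heq]; exact hMmem
  have hmM : m ≤ M := hMmaxF m hmmem
  have hgoal : ∀ i j : Nat, i < L.length → j < F.length →
      |L.getD i 0 - F.getD j 0| = |F.getD i 0 - F.getD j 0| := by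
    intro i j hi hj; rw [heq]
  refine ⟨?_, by have := abs_nonneg (M - m); omega, ?_⟩
  · obtain ⟨iM, hiM, hiMv⟩ := List.getElem_of_mem hMmemF
    obtain ⟨jm, hjm, hjmv⟩ := List.getElem_of_mem hmmem
    by_cases hij : iM = jm
    · -- the max and the min sit at the same index of equal lists: all entries are equal
      have hMm : M = m := by
        subst hij
        rw [hiMv] at hjmv; exact hjmv
      refine Or.inr ⟨0, 1, by omega, by omega, by omega, ?_⟩
      rw [hgoal 0 1 (by omega) (by omega)]
      have h0 : F.getD 0 0 ∈ F := pv_getD_mem F 0 (by omega)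
      have h1 : F.getD 1 0 ∈ F := pv_getD_mem F 1 (by omega)
      have b1 := hMmaxF _ h0
      have b2 := hmmin _ h0
      have b3 := hMmaxF _ h1
      have b4 := hmmin _ h1
      rw [abs_eq_max_neg, abs_eq_max_neg]; omega
    · refine Or.inr ⟨iM, jm, by omega, hjm, hij, ?_⟩
      rw [hgoal iM jm (by omega) hjm,
          List.getD_eq_getElem F 0 hiM, List.getD_eq_getElem F 0 hjm, hiMv, hjmv]
  · intro i j hi hj hij
    rw [hgoal i j hi hj]
    have h0 : F.getD i 0 ∈ F := pv_getD_mem F i (by omega)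
    have h1 : F.getD j 0 ∈ F := pv_getD_mem F j hj
    have b1 := hMmaxF _ h0
    have b2 := hmmin _ h0
    have b3 := hMmaxF _ h1
    have b4 := hmmin _ h1
    rw [abs_eq_max_neg, abs_eq_max_neg]; omega

theorem pvGoodA2 (arrays : List (List Int)) :
    pvGood (pvFirsts arrays) (pvLasts arrays)
      (((List.range arrays.length).map (fun k => (((pvLasts arrays).getD k 0 : Int), (k : Int)))).foldl
        (pvOstep ((List.range arrays.length).map
          (fun k => (((pvFirsts arrays).getD k 0 : Int), (k : Int))))) (-1)) := by
  set n := arrays.length with hn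
  set F := pvFirsts arrays with hF
  set L := pvLasts arrays with hL
  have hFlen : F.length = n := by simp [hF, pvFirsts, hn]
  have hLlen : L.length = n := by simp [hL, pvLasts, hn]
  set P := (List.range n).map (fun k => ((F.getD k 0 : Int), (k : Int))) with hP
  set Q := (List.range n).map (fun k => ((L.getD k 0 : Int), (k : Int))) with hQ
  have hIinfl : ∀ (a : Int × Int) (d : Int) (x : Int × Int), d ≤ pvIstep a d x := by
    intro a d x
    simp only [pvIstep]
    split_ifs <;> omega
  have hOinfl : ∀ (d : Int) (a : Int × Int), d ≤ pvOstep P d a :=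
    fun d a => pv_foldl_infl (pvIstep a) (hIinfl a) P d
  refine ⟨?_, pv_foldl_infl _ hOinfl Q (-1), ?_⟩
  · -- attainment
    have hIa : ∀ (a : Int × Int) (d : Int) (x : Int × Int),
        pvIstep a d x = d ∨ (a.2 ≠ x.2 ∧ pvIstep a d x = |a.1 - x.1|) := by
      intro a d x
      simp only [pvIstep]
      split_ifs with h1 h2
      · exact Or.inr ⟨h1, rfl⟩
      · exact Or.inl rfl
      · exact Or.inl rfl
    have hOa : ∀ (d : Int) (a : Int × Int),
        pvOstep P d a = d ∨ ∃ x ∈ P, a.2 ≠ x.2 ∧ pvOstep P d a = |a.1 - x.1| :=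
      fun d a => pv_foldl_attain (pvIstep a) (fun x w => a.2 ≠ x.2 ∧ w = |a.1 - x.1|)
        (fun d x => hIa a d x) P d
    rcases pv_foldl_attain (pvOstep P) (fun a w => ∃ x ∈ P, a.2 ≠ x.2 ∧ w = |a.1 - x.1|)
      (fun d a => hOa d a) Q (-1) with h | ⟨a, ha, x, hx, hax, hv⟩
    · exact Or.inl h
    · obtain ⟨k, hk, rfl⟩ := List.mem_map.mp ha
      obtain ⟨k', hk', rfl⟩ := List.mem_map.mp hx
      rw [List.mem_range] at hk hk'
      refine Or.inr ⟨k, k', by omega, by omega, ?_, hv⟩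
      intro hkk'; apply hax; simp [hkk']
  · -- upper bounds
    intro i j hi hj hij
    apply pv_le_foldl_of_mem (pvOstep P) hOinfl (x := ((L.getD i 0 : Int), (i : Int)))
    · intro e
      apply pv_le_foldl_of_mem (pvIstep _) (hIinfl _) (x := ((F.getD j 0 : Int), (j : Int)))
      · intro e'
        simp only [pvIstep]
        rw [if_pos (by simpa using hij)]
        split_ifs <;> omega
      · exact List.mem_map.mpr ⟨j, List.mem_range.mpr (by omega), rfl⟩
    · exact List.mem_map.mpr ⟨i, List.mem_range.mpr (by omega), rfl⟩

theorem pvGoodA (arrays : List (List Int)) (hPre : Pre_maxDistance4 arrays)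
    (hD : ¬ D_maxDistance4 arrays) :
    pvGood (pvFirsts arrays) (pvLasts arrays) (maxDistance4 arrays) := by
  by_cases heq : pvLasts arrays = pvFirsts arrays
  · rw [pvA_eq_of_eq arrays heq]
    exact pvGoodA1 arrays hPre hD heq
  · rw [pvA_eq_of_ne arrays heq]
    exact pvGoodA2 arrays

theorem pv_tight (arrays : List (List Int)) (hPre : Pre_maxDistance4 arrays)
    (hD : D_maxDistance4 arrays) : maxDistance4 arrays ≠ maxDistance4_alt arrays := by
  obtain ⟨h1, hhl⟩ := hD
  obtain ⟨a, rfl⟩ := List.length_eq_one_iff.mp h1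
  have ha : a ≠ [] := hPre.2 a (List.mem_singleton.mpr rfl)
  simp only [List.headD_cons] at hhl
  rw [pv_head?_eq a ha, pv_getLast?_eq a ha, Option.some_inj] at hhl
  have heq : pvLasts [a] = pvFirsts [a] := by simp [pvLasts, pvFirsts, hhl]
  have hA : maxDistance4 [a] = 0 := by
    rw [pvA_eq_of_eq _ heq]
    simp [pvLasts, pvFirsts, PySem.List.max?_id_cons, PySem.List.min?_id_cons, hhl]
  have hB : maxDistance4_alt [a] = -1 := rfl
  rw [hA, hB]
  omega


-- ===== VERDICT =====
theorem maxDistance4_spec : Claim_unchanged_maxDistance4 := by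
  intro arrays hDom hPre hD
  exact pvGood_unique (pvGoodA arrays hPre hD) (pvGoodB arrays hPre)

theorem maxDistance4_changed : Claim_changed_maxDistance4 := by
  unfold Claim_changed_maxDistance4; decide

theorem maxDistance4_tight : Claim_exact_maxDistance4 := by
  intro arrays _ hPre hD
  exact pv_tight arrays hPre hD
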